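-- pv_equiv track=rewrite | github.com/Muhammad-Aman1718/leetcode-problems | LeetCode/Arrays/python/easy/Find_The_Least_Frequent_Digit.py | getLeastFrequentDigit
-- ===== SOURCE A (Python) =====
-- def getLeastFrequentDigit(b: int) -> int:
--
--     n = str(b)
--     countFreq: dict[str, int] = {}
--
--     for i in n:
--         countFreq[i] = countFreq.get(i, 0) + 1
--
--     result: list[int] = []
--     for i in countFreq:
--         if countFreq[i] == 1:
--             result.append(int(i))
--     if result:
--         return min(result)
--     else:
--         return 0
-- ===== SOURCE B (Python) =====
-- def getLeastFrequentDigit(b: int) -> int: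
--     # sort-then-scan runs: equal characters of str(b) form contiguous runs in the
--     # sorted list; the first run of length 1 holds the smallest character that
--     # occurs exactly once (int('-') raises on negative b, as in the original).
--     s = sorted(str(b))
--     while s:
--         c = s[0]
--         rest = s[1:]
--         k = 0
--         while k < len(rest) and rest[k] == c:
--             k += 1
--         if k == 0:
--             return int(c)
--         s = rest[k:]
--     return 0
-- ===== Notes on version B (the rewrite author's own statement) =====
-- stated objective: alternative
-- what changed: Replaced the frequency dictionary plus collect-and-min pass by sorting the characters of str(b) and scanning equal-character runs, returning at the first singleton run (the smallest unique character), so no hash map and no explicit min are needed.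
import Mathlib
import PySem

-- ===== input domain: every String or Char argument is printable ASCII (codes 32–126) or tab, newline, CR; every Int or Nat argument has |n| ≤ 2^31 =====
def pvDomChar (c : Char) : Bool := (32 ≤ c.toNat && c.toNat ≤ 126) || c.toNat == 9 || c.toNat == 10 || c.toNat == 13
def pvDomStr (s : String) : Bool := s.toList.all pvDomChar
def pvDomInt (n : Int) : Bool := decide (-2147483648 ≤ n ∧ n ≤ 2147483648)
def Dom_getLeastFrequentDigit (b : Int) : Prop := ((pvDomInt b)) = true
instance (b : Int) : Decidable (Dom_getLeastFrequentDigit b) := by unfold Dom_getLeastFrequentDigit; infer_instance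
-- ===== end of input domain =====

-- B replaces the frequency dictionary plus collect-and-min pass by sorting the characters
-- of str(b) and scanning equal-character runs, returning at the first singleton run.

-- ===== PORT A =====
-- int(i) for a one-character string i (none = ValueError; the 0 default is never reached inside Pre_)
def pvChInt (c : Char) : Int := (PySem.Int.ofChars? [c]).getD 0

def getLeastFrequentDigit (b : Int) : Int :=
  let n := PySem.Int.toChars b
  let countFreq := n.foldl (fun d i => d.insert i (d.getD i 0 + 1)) (PySem.Dict.empty : PySem.Dict Char Int)
  let result := countFreq.keys.foldl
    (fun acc i => if countFreq.getD i 0 = 1 then acc ++ [pvChInt i] else acc) ([] : List Int)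
  if result ≠ [] then (PySem.List.min? result (fun x => x)).getD 0 else 0

-- ===== PORT B =====
-- the outer while loop of Source B: scan runs of equal characters in the sorted list
def pvRunScan : List Char → Int
  | [] => 0
  | c :: rest =>
    let k := (rest.takeWhile (fun x => x == c)).length
    if k = 0 then pvChInt c else pvRunScan (rest.drop k)
termination_by ys => ys.length
decreasing_by simp

def getLeastFrequentDigit_alt (b : Int) : Int :=
  pvRunScan (PySem.List.sorted (PySem.Int.toChars b) (fun c => c) false)

-- ===== PRECONDITION & SPEC =====
-- Pre_ excludes exactly b < 0: there str(b) starts with '-', whose count is 1, so A's int('-') raises ValueError (B raises it too).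
def Pre_getLeastFrequentDigit (b : Int) : Prop := 0 ≤ b
instance (b : Int) : Decidable (Pre_getLeastFrequentDigit b) := by unfold Pre_getLeastFrequentDigit; infer_instance
def pvWitness_getLeastFrequentDigit : Int := 122

def Spec_getLeastFrequentDigit (b : Int) (out : Int) : Prop := out = getLeastFrequentDigit_alt b
instance (b : Int) (out : Int) : Decidable (Spec_getLeastFrequentDigit b out) := by unfold Spec_getLeastFrequentDigit; infer_instance

-- ===== CLAIM (what is proved, stated in full; the proofs are below) =====
def Claim_equal_getLeastFrequentDigit : Prop := ∀ (b : Int), Dom_getLeastFrequentDigit b → Pre_getLeastFrequentDigit b → Spec_getLeastFrequentDigit b (getLeastFrequentDigit b)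

-- ===== LEMMAS AND PROOFS =====

lemma drop_takeWhile_len (p : Char → Bool) (l : List Char) :
    l.drop (l.takeWhile p).length = l.dropWhile p := by
  have h := List.drop_left (l₁ := l.takeWhile p) (l₂ := l.dropWhile p)
  rwa [List.takeWhile_append_dropWhile] at h

-- in a sorted list, if c is not the head of rest then c ∉ rest
lemma not_mem_of_sorted_head_ne (c : Char) (rest : List Char)
    (hp : (c :: rest).Pairwise (· ≤ ·)) (hh : ∀ h ∈ rest.head?, h ≠ c) : c ∉ rest := by
  intro hc
  cases rest with
  | nil => simp at hc
  | cons h t =>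
    have hhc : h ≠ c := hh h (by simp)
    have hch : c ≤ h := (List.pairwise_cons.mp hp).1 h (by simp)
    rcases List.mem_cons.mp hc with rfl | hct
    · exact hhc rfl
    · have : h ≤ c := (List.pairwise_cons.mp ((List.pairwise_cons.mp hp).2)).1 c hct
      exact hhc (le_antisymm this hch)

-- the run scanner on a sorted list returns int of the least character occurring exactly once
lemma runScan_spec (ys : List Char) (hs : ys.Pairwise (· ≤ ·)) :
    pvRunScan ys = (((ys.filter (fun x => decide (ys.count x = 1))).head?.map pvChInt).getD 0) := by
  induction hn : ys.length using Nat.strong_induction_on generalizing ys with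
  | _ n ih =>
  cases ys with
  | nil => simp [pvRunScan]
  | cons c rest =>
    subst hn
    rw [pvRunScan]
    set tw := rest.takeWhile (fun x => x == c) with htw
    by_cases hk : tw.length = 0
    · -- c occurs exactly once
      have htw0 : tw = [] := List.length_eq_zero_iff.mp hk
      have hcrest : c ∉ rest := by
        apply not_mem_of_sorted_head_ne c rest hs
        intro h hh hhc
        cases rest with
        | nil => simp at hh
        | cons r t =>
          simp at hh; subst hh; subst hhc
          simp [htw] at htw0
      have hcount : (c :: rest).count c = 1 := by
        simp [List.count_eq_zero.mpr hcrest]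
      rw [if_pos hk]
      rw [List.filter_cons_of_pos (by simp [hcount])]
      simp
    · -- run of length ≥ 2: drop the whole run
      rw [if_neg hk]
      have hdw : rest.drop tw.length = rest.dropWhile (fun x => x == c) := by
        rw [htw]; exact drop_takeWhile_len _ rest
      set dw := rest.dropWhile (fun x => x == c) with hdwdef
      have hrest : rest = tw ++ dw := (List.takeWhile_append_dropWhile).symm
      have htwc : ∀ x ∈ tw, x = c := fun x hx => by
        have := List.mem_takeWhile_imp (htw ▸ hx); simpa using this
      have hrs : rest.Pairwise (· ≤ ·) := (List.pairwise_cons.mp hs).2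
      have hdws : dw.Pairwise (· ≤ ·) := hrs.sublist (List.dropWhile_sublist _)
      have hcdw : c ∉ dw := by
        have hdwsub : dw.Sublist rest := List.dropWhile_sublist _
        have hpc : (c :: dw).Pairwise (· ≤ ·) := by
          rw [List.pairwise_cons]
          exact ⟨fun x hx => (List.pairwise_cons.mp hs).1 x (hdwsub.mem hx), hdws⟩
        apply not_mem_of_sorted_head_ne c dw hpc
        intro h hh
        cases hdw2 : dw with
        | nil => rw [hdw2] at hh; simp at hh
        | cons r t =>
          rw [hdw2] at hh; simp at hh; subst hh
          have := List.head?_dropWhile_not (fun x => x == c) rest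
          rw [← hdwdef, hdw2] at this; simpa using this
      -- forget the definitions of tw and dw, then substitute rest = tw ++ dw
      clear htw hdwdef hdw
      clear_value tw dw
      subst hrest
      have htwcnt : List.count c tw = tw.length :=
        List.count_eq_length.mpr (fun x hx => by simp [htwc x hx])
      have hccount : List.count c (c :: (tw ++ dw)) ≠ 1 := by
        rw [List.count_cons, List.count_append, htwcnt,
          List.count_eq_zero.mpr hcdw]
        simp
        exact fun h => hk (by simp [h])
      have hcounteq : ∀ x, x ≠ c → List.count x (c :: (tw ++ dw)) = List.count x dw := by
        intro x hx
        have h1 : List.count x tw = 0 :=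
          List.count_eq_zero.mpr (fun hmem => hx (htwc x hmem))
        rw [List.count_cons, List.count_append, h1]
        simp [Ne.symm hx]
      have hfil : (c :: (tw ++ dw)).filter (fun x => decide (List.count x (c :: (tw ++ dw)) = 1))
          = dw.filter (fun x => decide (List.count x dw = 1)) := by
        rw [List.filter_cons_of_neg (by simpa using hccount)]
        rw [List.filter_append]
        rw [List.filter_eq_nil_iff.mpr
          (fun x hx => by rw [htwc x hx]; simpa using hccount)]
        apply List.filter_congr
        intro x hx
        have hxc : x ≠ c := fun h => hcdw (h ▸ hx)
        simp [hcounteq x hxc]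
      rw [hfil]
      have hlen : dw.length < (c :: (tw ++ dw)).length := by
        simp [List.length_append]
      rw [show List.drop tw.length (tw ++ dw) = dw from by
        simpa using List.drop_left (l₁ := tw) (l₂ := dw)]
      exact ih dw.length hlen dw hdws rfl

lemma ofChars_digit (c : Char) (h : c.isDigit) :
    PySem.Int.ofChars? [c] = some ((c.toNat : Int) - 48) := by
  have h1 : 48 ≤ c.toNat := by simp [Char.isDigit] at h; exact h.1
  have h2 : c.toNat ≤ 57 := by simp [Char.isDigit] at h; exact h.2
  have hofn : Char.ofNat c.toNat = c := Char.ofNat_toNat c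
  interval_cases hn : c.toNat <;> (rw [← hofn]; decide)

lemma pvChInt_digit (c : Char) (h : c.isDigit) : pvChInt c = (c.toNat : Int) - 48 := by
  simp [pvChInt, ofChars_digit c h]

lemma char_le_toNat {a b : Char} (h : a ≤ b) : a.toNat ≤ b.toNat := by
  rw [Char.le_def] at h; exact Fin.mk_le_mk.mp h

lemma pvChInt_mono {a b : Char} (ha : a.isDigit) (hb : b.isDigit) (h : a ≤ b) :
    pvChInt a ≤ pvChInt b := by
  rw [pvChInt_digit a ha, pvChInt_digit b hb]
  have := char_le_toNat h
  omega

lemma digitChar_isDigit (n : Nat) (h : n < 10) : (Nat.digitChar n).isDigit := by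
  interval_cases n <;> decide

lemma toDigitsCore_digits : ∀ (fuel n : Nat) (acc : List Char), (∀ c ∈ acc, c.isDigit) →
    ∀ c ∈ Nat.toDigitsCore 10 fuel n acc, c.isDigit := by
  intro fuel
  induction fuel with
  | zero => intro n acc ha c hc; simp [Nat.toDigitsCore] at hc; exact ha c hc
  | succ f ih =>
    intro n acc ha c hc
    simp only [Nat.toDigitsCore] at hc
    by_cases h0 : n / 10 = 0
    · simp [h0] at hc
      rcases hc with rfl | hc
      · exact digitChar_isDigit _ (Nat.mod_lt _ (by omega))
      · exact ha c hc
    · simp [h0] at hc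
      refine ih _ _ ?_ c hc
      intro x hx
      rcases List.mem_cons.mp hx with rfl | hx
      · exact digitChar_isDigit _ (Nat.mod_lt _ (by omega))
      · exact ha x hx

lemma toChars_digits (b : Int) (hb : 0 ≤ b) : ∀ c ∈ PySem.Int.toChars b, c.isDigit := by
  intro c hc
  simp only [PySem.Int.toChars, if_neg (by omega : ¬ b < 0)] at hc
  exact toDigitsCore_digits _ _ [] (by simp) c hc

lemma main_core (b : Int) (hb : 0 ≤ b) :
    getLeastFrequentDigit b = getLeastFrequentDigit_alt b := by
  rw [getLeastFrequentDigit, getLeastFrequentDigit_alt]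
  have hdig : ∀ c ∈ PySem.Int.toChars b, c.isDigit := toChars_digits b hb
  set xs := PySem.Int.toChars b with hxs
  set ys := PySem.List.sorted xs (fun c => c) false with hys
  have hperm : ys.Perm xs := PySem.List.sorted_perm xs _ _
  have hpair : ys.Pairwise (· ≤ ·) := PySem.List.sorted_pairwise xs (fun c => c)
  -- B side
  rw [runScan_spec ys hpair]
  -- normalise B's filter predicate to counts in xs
  have hfB : ys.filter (fun x => decide (List.count x ys = 1))
      = ys.filter (fun x => decide (List.count x xs = 1)) :=
    List.filter_congr (fun x _ => by rw [hperm.count_eq])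
  rw [hfB]
  -- A side: the dict loop is Counter, keys are the dedup, the collect loop is map∘filter
  rw [PySem.Dict.foldl_insert_getD_add_one_eq_counter, PySem.Dict.keys_counter]
  have hconv : (fun (acc : List Int) (i : Char) =>
      if (PySem.Dict.counter xs).getD i 0 = 1 then acc ++ [pvChInt i] else acc)
      = (fun acc i => if (fun i => decide ((PySem.Dict.counter xs).getD i 0 = 1)) i = true
          then acc ++ [pvChInt i] else acc) := by
    funext acc i; simp
  rw [hconv, PySem.List.foldl_append_if (fun i => decide ((PySem.Dict.counter xs).getD i 0 = 1)) pvChInt]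
  have hfA : (PySem.Set.ofList xs).filter (fun i => decide ((PySem.Dict.counter xs).getD i 0 = 1))
      = (PySem.Set.ofList xs).filter (fun x => decide (List.count x xs = 1)) :=
    List.filter_congr (fun x _ => by rw [PySem.Dict.getD_counter]; simp)
  rw [hfA]
  simp only [List.nil_append]
  -- now compare min over the unique digits with the head of the sorted unique digits
  cases hF : ys.filter (fun x => decide (List.count x xs = 1)) with
  | nil =>
    have hnone : ∀ x ∈ xs, ¬ (List.count x xs = 1) := by
      intro x hx
      have hxy : x ∈ ys := hperm.mem_iff.mpr hx
      have := List.filter_eq_nil_iff.mp hF x hxy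
      simpa using this
    have hU : (PySem.Set.ofList xs).filter (fun x => decide (List.count x xs = 1)) = [] :=
      List.filter_eq_nil_iff.mpr (fun x hx => by
        simpa using hnone x ((PySem.Set.mem_ofList xs x).mp hx))
    rw [hU]
    simp
  | cons m t =>
    have hmF : m ∈ ys.filter (fun x => decide (List.count x xs = 1)) := by rw [hF]; simp
    have hmm := List.mem_filter.mp hmF
    have hmys : m ∈ ys := hmm.1
    have hmxs : m ∈ xs := hperm.mem_iff.mp hmys
    have hmq : List.count m xs = 1 := by simpa using hmm.2
    have hFpair : (ys.filter (fun x => decide (List.count x xs = 1))).Pairwise (· ≤ ·) :=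
      hpair.filter _
    have hmin : ∀ x ∈ ys.filter (fun x => decide (List.count x xs = 1)), m ≤ x := by
      intro x hx
      rw [hF] at hx
      rcases List.mem_cons.mp hx with rfl | hx
      · exact le_refl x
      · rw [hF] at hFpair
        exact (List.pairwise_cons.mp hFpair).1 x hx
    have hmU : m ∈ (PySem.Set.ofList xs).filter (fun x => decide (List.count x xs = 1)) :=
      List.mem_filter.mpr ⟨(PySem.Set.mem_ofList xs m).mpr hmxs, by simpa using hmq⟩
    have hmR : pvChInt m ∈ ((PySem.Set.ofList xs).filter (fun x => decide (List.count x xs = 1))).map pvChInt :=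
      List.mem_map.mpr ⟨m, hmU, rfl⟩
    have hRne : ((PySem.Set.ofList xs).filter (fun x => decide (List.count x xs = 1))).map pvChInt ≠ [] :=
      List.ne_nil_of_mem hmR
    rw [if_pos hRne]
    cases hmin? : PySem.List.min? (((PySem.Set.ofList xs).filter (fun x => decide (List.count x xs = 1))).map pvChInt) (fun x => x) with
    | none => exact absurd ((PySem.List.min?_eq_none_iff _ _).mp hmin?) hRne
    | some v =>
      have hvmem := PySem.List.min?_mem hmin?
      rcases List.mem_map.mp hvmem with ⟨x0, hx0U, rfl⟩
      have hx0 := List.mem_filter.mp hx0U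
      have hx0xs : x0 ∈ xs := (PySem.Set.mem_ofList xs x0).mp hx0.1
      have hx0q : List.count x0 xs = 1 := by simpa using hx0.2
      have hx0F : x0 ∈ ys.filter (fun x => decide (List.count x xs = 1)) :=
        List.mem_filter.mpr ⟨hperm.mem_iff.mpr hx0xs, by simpa using hx0q⟩
      have hle1 : pvChInt m ≤ pvChInt x0 :=
        pvChInt_mono (hdig m hmxs) (hdig x0 hx0xs) (hmin x0 hx0F)
      have hle2 : pvChInt x0 ≤ pvChInt m := PySem.List.min?_isMin hmin? (pvChInt m) hmR
      simp [le_antisymm hle2 hle1]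

-- ===== VERDICT (by name: the statement is the Claim_ definition above) =====
theorem getLeastFrequentDigit_spec : Claim_equal_getLeastFrequentDigit := by
  intro b _ hpre
  unfold Spec_getLeastFrequentDigit
  exact main_core b hpre
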